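-- pv_equiv track=rewrite | github.com/pm1100tm/Algorithm | tenshoku/q1.py | solution
-- ===== SOURCE A (Python) =====
-- def solution(A, B):
--     def count_pieces(length, stick1, stick2):
--         return (stick1 // length) + (stick2 // length)
--
--     def can_form_square(length, stick1, stick2):
--         return count_pieces(length, stick1, stick2) >= 4
--
--     for length in range(max(A, B), 0, -1): # min을 max로 바꿔야 한다.
--         if can_form_square(length, A, B):
--             return length
--     return 0
-- ===== SOURCE B (Python) =====
-- def solution(A, B):
--     lo, hi = 1, max(A, B)
--     best = 0
--     while lo <= hi:
--         mid = (lo + hi) // 2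
--         if A // mid + B // mid >= 4:
--             best = mid
--             lo = mid + 1
--         else:
--             hi = mid - 1
--     return best
-- ===== Notes on version B (the rewrite author's own statement) =====
-- stated objective: faster
-- what changed: A scans every candidate length from max(A,B) down to 1; B binary-searches the largest length L with A//L + B//L >= 4, exploiting that the piece count is antitone in L for nonnegative sticks; Pre_ restricts to the natural domain of nonnegative stick lengths (plus the trivial all-nonpositive case), excluding mixed-sign inputs where the predicate is not monotone and binary search does not apply.
-- outside the precondition, e.g. on solution(-20, 60): A returns 10, B returns 8
import Mathlib
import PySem

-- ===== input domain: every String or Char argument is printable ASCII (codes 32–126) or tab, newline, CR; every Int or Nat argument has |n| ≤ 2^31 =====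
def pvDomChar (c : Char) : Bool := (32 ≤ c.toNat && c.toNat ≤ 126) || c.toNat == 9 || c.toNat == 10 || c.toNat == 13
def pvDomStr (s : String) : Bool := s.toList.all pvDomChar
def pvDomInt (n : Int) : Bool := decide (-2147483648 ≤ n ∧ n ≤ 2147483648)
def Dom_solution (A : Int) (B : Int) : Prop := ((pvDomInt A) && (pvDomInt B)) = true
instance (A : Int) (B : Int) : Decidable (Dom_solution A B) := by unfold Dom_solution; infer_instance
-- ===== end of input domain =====

-- B replaces A's linear downward scan by a binary search on the length (objective: faster).

-- ===== PORT A =====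
def pvCountPieces (length stick1 stick2 : Int) : Int :=
  PySem.Int.floordiv stick1 length + PySem.Int.floordiv stick2 length

def pvCanFormSquare (length stick1 stick2 : Int) : Bool :=
  decide (pvCountPieces length stick1 stick2 ≥ 4)

def pvLoopA (A B : Int) : List Int → Int
  | [] => 0
  | l :: rest => if pvCanFormSquare l A B then l else pvLoopA A B rest

def solution (A : Int) (B : Int) : Int :=
  pvLoopA A B (PySem.List.pyRange (max A B) 0 (-1))

-- ===== PORT B =====
-- Source B's while loop; 'fuel' is only a totality guard (never exhausted when started as below)
def pvLoopB (A B : Int) : Nat → Int → Int → Int → Int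
  | 0, best, _, _ => best
  | fuel + 1, best, lo, hi =>
    if lo ≤ hi then
      let mid := PySem.Int.floordiv (lo + hi) 2
      if PySem.Int.floordiv A mid + PySem.Int.floordiv B mid ≥ 4 then
        pvLoopB A B fuel mid (mid + 1) hi
      else
        pvLoopB A B fuel best lo (mid - 1)
    else best

def solution_alt (A : Int) (B : Int) : Int :=
  pvLoopB A B ((max A B).toNat + 1) 0 1 (max A B)

-- ===== PRECONDITION & SPEC =====
-- Pre_ restricts to the problem's natural domain: both stick lengths nonnegative (or both
-- nonpositive, where there is no candidate length at all). Mixed-sign inputs — one stick of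
-- negative length — are outside the problem's meaning, and there the piece-count predicate is
-- not monotone in the length, so a binary search does not apply.
def Pre_solution (A : Int) (B : Int) : Prop := (0 ≤ A ∧ 0 ≤ B) ∨ (A ≤ 0 ∧ B ≤ 0)
instance (A : Int) (B : Int) : Decidable (Pre_solution A B) := by unfold Pre_solution; infer_instance

def pvWitness_solution : Int × Int := (7, 9)

def Spec_solution (A : Int) (B : Int) (out : Int) : Prop := out = solution_alt A B
instance (A : Int) (B : Int) (out : Int) : Decidable (Spec_solution A B out) := by unfold Spec_solution; infer_instance

-- ===== CLAIM (what is proved, stated in full; the proofs are below) =====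
def Claim_equal_solution : Prop := ∀ (A : Int) (B : Int), Dom_solution A B → Pre_solution A B → Spec_solution A B (solution A B)

-- ===== LEMMAS AND PROOFS =====

def pvHit (A B l : Int) : Prop := 4 ≤ PySem.Int.floordiv A l + PySem.Int.floordiv B l

-- "r is the answer": the greatest l in [1, M] with pvHit, or 0 if none
def pvIsAns (A B M r : Int) : Prop :=
  (r = 0 ∧ ∀ l, 1 ≤ l → l ≤ M → ¬ pvHit A B l) ∨
  (1 ≤ r ∧ r ≤ M ∧ pvHit A B r ∧ ∀ l, r < l → l ≤ M → ¬ pvHit A B l)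

lemma pvIsAns_unique {A B M r s : Int} (hr : pvIsAns A B M r) (hs : pvIsAns A B M s) : r = s := by
  rcases hr with ⟨hr0, hrn⟩ | ⟨hr1, hrM, hrh, hrn⟩ <;>
    rcases hs with ⟨hs0, hsn⟩ | ⟨hs1, hsM, hsh, hsn⟩
  · omega
  · exact absurd hsh (hrn s hs1 hsM)
  · exact absurd hrh (hsn r hr1 hrM)
  · by_contra hne
    rcases lt_or_gt_of_ne hne with h | h
    · exact hrn s h hsM hsh
    · exact hsn r h hrM hrh

lemma pvLoopA_isAns (A B M : Int) : ∀ (n : Nat) (k : Int), k.toNat = n → k ≤ M →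
    (∀ l, k < l → l ≤ M → ¬ pvHit A B l) →
    pvIsAns A B M (pvLoopA A B (PySem.List.pyRange k 0 (-1))) := by
  intro n
  induction n with
  | zero =>
    intro k hk hkM h
    rw [PySem.List.pyRange_neg_one_eq_nil (by omega)]
    exact Or.inl ⟨rfl, fun l h1 h2 => h l (by omega) h2⟩
  | succ n ih =>
    intro k hk hkM h
    rw [PySem.List.pyRange_neg_one_cons (by omega : (0:Int) < k)]
    by_cases hc : pvHit A B k
    · simp only [pvLoopA, pvCanFormSquare, pvCountPieces, pvHit] at hc ⊢
      rw [if_pos (by simpa using hc)]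
      exact Or.inr ⟨by omega, hkM, hc, h⟩
    · simp only [pvLoopA]
      rw [if_neg (by simpa [pvCanFormSquare, pvCountPieces, pvHit] using hc)]
      exact ih (k - 1) (by omega) (by omega) (fun l h1 h2 => by
        rcases eq_or_lt_of_le (show k ≤ l by omega) with rfl | h3
        · exact hc
        · exact h l h3 h2)

lemma pvFloordiv_nonneg (n l : Int) (hn : 0 ≤ n) (hl : 0 < l) :
    0 ≤ PySem.Int.floordiv n l := by
  have hv := (PySem.Int.floordiv_eq_iff_of_pos hl).mp
    (rfl : PySem.Int.floordiv n l = PySem.Int.floordiv n l)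
  nlinarith [hv.2]

lemma pvFloordiv_anti (n l l' : Int) (hn : 0 ≤ n) (hl : 0 < l) (h : l ≤ l') :
    PySem.Int.floordiv n l' ≤ PySem.Int.floordiv n l := by
  have hl' : (0:Int) < l' := by omega
  have hv := (PySem.Int.floordiv_eq_iff_of_pos hl').mp
    (rfl : PySem.Int.floordiv n l' = PySem.Int.floordiv n l' )
  have h0 : 0 ≤ PySem.Int.floordiv n l' := pvFloordiv_nonneg n l' hn hl'
  rw [PySem.Int.le_floordiv_iff_mul_le hl]
  nlinarith [hv.1]

lemma pvHit_anti (A B l l' : Int) (hA : 0 ≤ A) (hB : 0 ≤ B) (h1 : 0 < l) (h2 : l ≤ l')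
    (h : pvHit A B l') : pvHit A B l := by
  unfold pvHit at h ⊢
  have := pvFloordiv_anti A l l' hA h1 h2
  have := pvFloordiv_anti B l l' hB h1 h2
  omega

lemma pvLoopB_isAns (A B M : Int) (hA : 0 ≤ A) (hB : 0 ≤ B) :
    ∀ (fuel : Nat) (best lo hi : Int),
    1 ≤ lo → lo = best + 1 → hi ≤ M → (hi + 1 - lo).toNat ≤ fuel →
    (best = 0 ∨ (1 ≤ best ∧ best ≤ M ∧ pvHit A B best)) →
    (∀ l, hi < l → l ≤ M → ¬ pvHit A B l) →
    pvIsAns A B M (pvLoopB A B fuel best lo hi) := by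
  intro fuel
  induction fuel with
  | zero =>
    intro best lo hi hlo hbl hhM hf hbest hno
    simp only [pvLoopB]
    rcases hbest with h0 | ⟨h1, h2, h3⟩
    · exact Or.inl ⟨h0, fun l ha hb => hno l (by omega) hb⟩
    · exact Or.inr ⟨h1, h2, h3, fun l ha hb => hno l (by omega) hb⟩
  | succ fuel ih =>
    intro best lo hi hlo hbl hhM hf hbest hno
    simp only [pvLoopB]
    split_ifs with hle hhit
    · -- lo ≤ hi, midpoint hits
      have hmid := PySem.Int.floordiv_two_mid_bounds hle
      exact ih (PySem.Int.floordiv (lo + hi) 2) (PySem.Int.floordiv (lo + hi) 2 + 1) hi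
        (by omega) rfl hhM (by omega)
        (Or.inr ⟨by omega, by omega, hhit⟩) hno
    · -- lo ≤ hi, midpoint misses: the whole tail [mid, hi] misses by antitonicity
      have hmid := PySem.Int.floordiv_two_mid_bounds hle
      refine ih best lo (PySem.Int.floordiv (lo + hi) 2 - 1)
        hlo hbl (by omega) (by omega) hbest (fun l ha hb => ?_)
      rcases le_or_gt l hi with h | h
      · intro hh
        exact hhit (pvHit_anti A B (PySem.Int.floordiv (lo + hi) 2) l hA hB (by omega)
          (by omega) hh)
      · exact hno l h hb
    · -- lo > hi: return best
      rcases hbest with h0 | ⟨h1, h2, h3⟩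
      · exact Or.inl ⟨h0, fun l ha hb => hno l (by omega) hb⟩
      · exact Or.inr ⟨h1, h2, h3, fun l ha hb => hno l (by omega) hb⟩

lemma solution_isAns (A B : Int) : pvIsAns A B (max A B) (solution A B) := by
  unfold solution
  exact pvLoopA_isAns A B (max A B) (max A B).toNat (max A B) rfl le_rfl
    (fun l h1 h2 => by omega)

lemma solution_alt_isAns (A B : Int) (hA : 0 ≤ A) (hB : 0 ≤ B) :
    pvIsAns A B (max A B) (solution_alt A B) := by
  unfold solution_alt
  exact pvLoopB_isAns A B (max A B) hA hB ((max A B).toNat + 1) 0 1 (max A B)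
    le_rfl rfl le_rfl (by omega) (Or.inl rfl) (fun l h1 h2 => by omega)

-- ===== VERDICT (by name: the statement is the Claim_ definition above) =====
theorem solution_spec : Claim_equal_solution := by
  intro A B _ hpre
  rcases hpre with ⟨hA, hB⟩ | ⟨hA, hB⟩
  · exact pvIsAns_unique (solution_isAns A B) (solution_alt_isAns A B hA hB)
  · -- both nonpositive: no candidate length, both loops return 0 at once
    have hM : max A B ≤ 0 := by omega
    unfold Spec_solution solution solution_alt
    rw [PySem.List.pyRange_neg_one_eq_nil (by omega)]
    simp only [pvLoopA, pvLoopB]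
    rw [if_neg (by omega)]
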